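-- pv_equiv track=rewrite | github.com/rrkas/dsa-practice-2026 | platforms/hacker-rank/board-cutting/solutions/solution.py | boardCutting
-- ===== SOURCE A (Python) =====
-- MOD = 10**9 + 7
--
-- def boardCutting(cost_y, cost_x):
--     cost_x.sort(reverse=True)
--     cost_y.sort(reverse=True)
--
--     cost = 0
--     i, j = 0, 0
--     h, v = 1, 1
--     while i < len(cost_x) and j < len(cost_y):
--         if cost_x[i] > cost_y[j]:
--             cost += cost_x[i] * h
--             v += 1
--             i += 1
--         else:
--             cost += cost_y[j] * v
--             h += 1
--             j += 1
--
--         cost %= MOD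
--
--     while i < len(cost_x):
--         cost += cost_x[i] * h
--         v += 1
--         i += 1
--
--         cost %= MOD
--
--     while j < len(cost_y):
--         cost += cost_y[j] * v
--         h += 1
--         j += 1
--
--         cost %= MOD
--
--     return cost
-- ===== SOURCE B (Python) =====
-- MOD = 10**9 + 7
--
--
-- def _lower(a, t):
--     # first index i with a[i] >= t in ascending list a (hand-written binary search)
--     lo, hi = 0, len(a)
--     while lo < hi:
--         mid = (lo + hi) // 2
--         if a[mid] < t:
--             lo = mid + 1
--         else:
--             hi = mid
--     return lo
--
--
-- def _upper(a, t):
--     # first index i with a[i] > t in ascending list a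
--     lo, hi = 0, len(a)
--     while lo < hi:
--         mid = (lo + hi) // 2
--         if a[mid] <= t:
--             lo = mid + 1
--         else:
--             hi = mid
--     return lo
--
--
-- def boardCutting(cost_y, cost_x):
--     # same in-place sorts as the original (observable argument mutation)
--     cost_x.sort(reverse=True)
--     cost_y.sort(reverse=True)
--     xs = cost_x[::-1]  # ascending copies for binary search
--     ys = cost_y[::-1]
--     total = 0
--     for x in cost_x:
--         # a vertical cut x is made after exactly the horizontal cuts y >= x,
--         # so its multiplier is 1 + #{y in cost_y : y >= x}
--         total += x * (1 + len(ys) - _lower(ys, x))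
--     for y in cost_y:
--         # a horizontal cut y is made after exactly the vertical cuts x > y
--         total += y * (1 + len(xs) - _upper(xs, y))
--     return total % MOD
-- ===== Notes on version B (the rewrite author's own statement) =====
-- stated objective: alternative
-- what changed: A's stateful greedy simulation (two-pointer merge with running h/v counters and per-step mod) is replaced by a closed-form contribution formula: each vertical cut x contributes x*(1+#{y>=x}) and each horizontal cut y contributes y*(1+#{x>y}), the counts found by hand-written binary search on ascending copies, summed and reduced mod once (per-step Python % with a positive modulus telescopes).
import Mathlib
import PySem

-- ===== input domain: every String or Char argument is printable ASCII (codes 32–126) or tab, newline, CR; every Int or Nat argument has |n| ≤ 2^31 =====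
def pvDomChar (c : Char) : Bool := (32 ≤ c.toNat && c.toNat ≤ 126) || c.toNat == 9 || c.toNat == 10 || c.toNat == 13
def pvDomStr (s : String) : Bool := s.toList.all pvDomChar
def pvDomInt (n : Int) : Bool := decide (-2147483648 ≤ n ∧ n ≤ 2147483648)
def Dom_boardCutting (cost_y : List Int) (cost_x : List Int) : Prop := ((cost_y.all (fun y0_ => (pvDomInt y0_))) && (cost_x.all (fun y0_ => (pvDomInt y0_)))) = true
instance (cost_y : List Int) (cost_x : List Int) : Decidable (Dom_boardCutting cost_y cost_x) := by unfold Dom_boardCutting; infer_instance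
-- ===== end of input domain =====

-- B replaces A's stateful greedy simulation (two-pointer merge with running h/v counters
-- and per-step mod) by a closed-form per-cut contribution formula with binary-search
-- counts and one final mod (alternative algorithm, same asymptotic cost); both versions
-- sort the argument lists in place, the equivalence proved is about the return value.

-- ===== PORT A =====
def pvMOD : Int := 1000000007

-- A's first while loop (both pointers live); returns the remaining suffixes and the state
def loopMergeA : List Int → List Int → Int → Int → Int → (List Int × List Int × Int × Int × Int)
  | [], ys, cost, h, v => ([], ys, cost, h, v)
  | x :: xs, [], cost, h, v => (x :: xs, [], cost, h, v)
  | x :: xs, y :: ys, cost, h, v =>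
      if x > y then loopMergeA xs (y :: ys) (PySem.Int.mod (cost + x * h) pvMOD) h (v + 1)
      else loopMergeA (x :: xs) ys (PySem.Int.mod (cost + y * v) pvMOD) (h + 1) v

-- A's second while loop (remaining cost_x); returns (cost, v)
def loopXA : List Int → Int → Int → Int → (Int × Int)
  | [], cost, _h, v => (cost, v)
  | x :: xs, cost, h, v => loopXA xs (PySem.Int.mod (cost + x * h) pvMOD) h (v + 1)

-- A's third while loop (remaining cost_y); returns (cost, h)
def loopYA : List Int → Int → Int → Int → (Int × Int)
  | [], cost, h, _v => (cost, h)
  | y :: ys, cost, h, v => loopYA ys (PySem.Int.mod (cost + y * v) pvMOD) (h + 1) v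

def boardCutting (cost_y : List Int) (cost_x : List Int) : Int :=
  let cx := PySem.List.sorted cost_x (fun t => t) true
  let cy := PySem.List.sorted cost_y (fun t => t) true
  let r := loopMergeA cx cy 0 1 1
  let r2 := loopXA r.1 r.2.2.1 r.2.2.2.1 r.2.2.2.2
  let r3 := loopYA r.2.1 r2.1 r.2.2.2.1 r2.2
  r3.1

-- ===== PORT B =====
-- Source B's hand-written _lower: first index i with a[i] >= t in ascending a.
-- lo/hi stay in [0, len(a)] in Python, so Nat indices are exact; a[mid] always has
-- mid < hi <= len(a), so getD is the in-range Python a[mid].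
def lbGo (a : List Int) (t : Int) (lo hi : Nat) : Nat :=
  if _h : lo < hi then
    if a.getD ((lo + hi) / 2) 0 < t then lbGo a t ((lo + hi) / 2 + 1) hi
    else lbGo a t lo ((lo + hi) / 2)
  else lo
termination_by hi - lo
decreasing_by all_goals omega

def lowerB (a : List Int) (t : Int) : Nat := lbGo a t 0 a.length

-- Source B's hand-written _upper: first index i with a[i] > t
def ubGo (a : List Int) (t : Int) (lo hi : Nat) : Nat :=
  if _h : lo < hi then
    if a.getD ((lo + hi) / 2) 0 ≤ t then ubGo a t ((lo + hi) / 2 + 1) hi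
    else ubGo a t lo ((lo + hi) / 2)
  else lo
termination_by hi - lo
decreasing_by all_goals omega

def upperB (a : List Int) (t : Int) : Nat := ubGo a t 0 a.length

def boardCutting_alt (cost_y : List Int) (cost_x : List Int) : Int :=
  let cx := PySem.List.sorted cost_x (fun t => t) true
  let cy := PySem.List.sorted cost_y (fun t => t) true
  -- cost_x[::-1] is reverse (PySem.List.slice?_none_none_neg_one)
  let xs := cx.reverse
  let ys := cy.reverse
  let t1 := cx.foldl (fun acc x => acc + x * (1 + ((ys.length : Int) - (lowerB ys x : Int)))) 0
  let t2 := cy.foldl (fun acc y => acc + y * (1 + ((xs.length : Int) - (upperB xs y : Int)))) 0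
  PySem.Int.mod (t1 + t2) pvMOD

-- ===== PRECONDITION & SPEC =====
def Spec_boardCutting (cost_y : List Int) (cost_x : List Int) (out : Int) : Prop := out = boardCutting_alt cost_y cost_x
instance (cost_y : List Int) (cost_x : List Int) (out : Int) : Decidable (Spec_boardCutting cost_y cost_x out) := by unfold Spec_boardCutting; infer_instance

-- ===== CLAIM (what is proved, stated in full; the proofs are below) =====
def Claim_equal_boardCutting : Prop := ∀ (cost_y : List Int) (cost_x : List Int), Dom_boardCutting cost_y cost_x → Spec_boardCutting cost_y cost_x (boardCutting cost_y cost_x)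

-- ===== LEMMAS AND PROOFS =====

-- the total A adds, computed WITHOUT the per-step mod, in A's consumption order
def raw : List Int → List Int → Int → Int → Int
  | [], ys, _h, v => v * ys.sum
  | x :: xs, [], h, _v => h * (x :: xs).sum
  | x :: xs, y :: ys, h, v =>
      if x > y then x * h + raw xs (y :: ys) h (v + 1)
      else y * v + raw (x :: xs) ys (h + 1) v

-- A's three loops chained, as boardCutting runs them
def chainA (xs ys : List Int) (c h v : Int) : Int :=
  let r := loopMergeA xs ys c h v
  let r2 := loopXA r.1 r.2.2.1 r.2.2.2.1 r.2.2.2.2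
  (loopYA r.2.1 r2.1 r.2.2.2.1 r2.2).1

lemma pmod_idem (a : Int) : PySem.Int.mod (PySem.Int.mod a pvMOD) pvMOD = PySem.Int.mod a pvMOD := by
  have h : (0 : Int) < pvMOD := by norm_num [pvMOD]
  simp only [PySem.Int.mod_eq_emod_of_pos h]
  exact Int.emod_emod_of_dvd a dvd_rfl

lemma pmod_absorb (a b : Int) :
    PySem.Int.mod (PySem.Int.mod a pvMOD + b) pvMOD = PySem.Int.mod (a + b) pvMOD := by
  have h : (0 : Int) < pvMOD := by norm_num [pvMOD]
  rw [PySem.Int.mod_eq_emod_of_pos h, PySem.Int.mod_eq_emod_of_pos h, PySem.Int.mod_eq_emod_of_pos h,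
    Int.emod_add_emod]

lemma loopXA_cost (xs : List Int) (c h v : Int) (hc : PySem.Int.mod c pvMOD = c) :
    (loopXA xs c h v).1 = PySem.Int.mod (c + h * xs.sum) pvMOD := by
  induction xs generalizing c v with
  | nil => simp [loopXA, hc]
  | cons x xs ih =>
    rw [loopXA, ih _ _ (pmod_idem _), pmod_absorb]
    congr 1; simp; ring

lemma loopYA_cost (ys : List Int) (c h v : Int) (hc : PySem.Int.mod c pvMOD = c) :
    (loopYA ys c h v).1 = PySem.Int.mod (c + v * ys.sum) pvMOD := by
  induction ys generalizing c h with
  | nil => simp [loopYA, hc]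
  | cons y ys ih =>
    rw [loopYA, ih _ _ (pmod_idem _), pmod_absorb]
    congr 1; simp; ring

lemma chainA_eq (xs ys : List Int) (h v c : Int) (hc : PySem.Int.mod c pvMOD = c) :
    chainA xs ys c h v = PySem.Int.mod (c + raw xs ys h v) pvMOD := by
  fun_induction raw xs ys h v generalizing c with
  | case1 ys _h v =>
    simp only [chainA, loopMergeA, loopXA]
    rw [loopYA_cost _ _ _ _ hc]
  | case2 x xs h _v =>
    simp only [chainA, loopMergeA]
    have := loopXA_cost (x :: xs) c h _v hc
    cases hx : loopXA (x :: xs) c h _v with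
    | mk c2 v2 => simp only [hx] at this; simp [loopYA, this]
  | case3 x xs y ys h v hgt ih =>
    have : chainA (x :: xs) (y :: ys) c h v
        = chainA xs (y :: ys) (PySem.Int.mod (c + x * h) pvMOD) h (v + 1) := by
      simp only [chainA, loopMergeA, if_pos hgt]
    rw [this, ih _ (pmod_idem _), pmod_absorb, add_assoc]
  | case4 x xs y ys h v hgt ih =>
    have : chainA (x :: xs) (y :: ys) c h v
        = chainA (x :: xs) ys (PySem.Int.mod (c + y * v) pvMOD) (h + 1) v := by
      simp only [chainA, loopMergeA, if_neg hgt]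
    rw [this, ih _ (pmod_idem _), pmod_absorb, add_assoc]

-- count of elements ≥ x (resp. > y), as Int
def cntGe (ys : List Int) (x : Int) : Int := (ys.countP (fun u => decide (x ≤ u)) : Int)
def cntGt (xs : List Int) (y : Int) : Int := (xs.countP (fun u => decide (y < u)) : Int)

lemma sum_map_mul_const (l : List Int) (v : Int) :
    (l.map (fun y => y * v)).sum = v * l.sum := by
  induction l with
  | nil => simp
  | cons a l ih => simp [ih]; ring

-- closed form for raw on descending inputs: per-cut contributions with count multipliers
lemma raw_count (xs ys : List Int) (h v : Int)
    (hx : xs.Pairwise (fun a b => b ≤ a)) (hy : ys.Pairwise (fun a b => b ≤ a)) :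
    raw xs ys h v
      = (xs.map (fun x => x * (h + cntGe ys x))).sum
        + (ys.map (fun y => y * (v + cntGt xs y))).sum := by
  fun_induction raw xs ys h v with
  | case1 ys _h v =>
    simp only [List.map_nil, List.sum_nil, zero_add, cntGt, List.countP_nil]
    push_cast
    simpa using (sum_map_mul_const ys v).symm
  | case2 x xs h _v =>
    simp only [List.map_nil, List.sum_nil, add_zero, cntGe, List.countP_nil]
    push_cast
    simpa using (sum_map_mul_const (x :: xs) h).symm
  | case3 x xs y ys h v hgt ih =>
    have hx' := (List.pairwise_cons.1 hx)
    have hy' := (List.pairwise_cons.1 hy)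
    rw [ih hx'.2 hy]
    have hge0 : cntGe (y :: ys) x = 0 := by
      simp only [cntGe]
      norm_num
      exact ⟨hgt, fun a ha => lt_of_le_of_lt (hy'.1 a ha) hgt⟩
    have hmap : (y :: ys).map (fun y' => y' * (v + cntGt (x :: xs) y'))
        = (y :: ys).map (fun y' => y' * (v + 1 + cntGt xs y')) := by
      apply List.map_congr_left
      intro y' hy''
      have hle : y' ≤ y := by
        rcases List.mem_cons.1 hy'' with rfl | hm
        · omega
        · exact hy'.1 y' hm
      have : cntGt (x :: xs) y' = 1 + cntGt xs y' := by
        simp only [cntGt, List.countP_cons]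
        have : decide (y' < x) = true := by simp; omega
        simp [this]; ring
      rw [this]; ring_nf
    rw [hmap]
    simp only [List.map_cons, List.sum_cons, hge0]
    ring
  | case4 x xs y ys h v hgt ih =>
    have hx' := (List.pairwise_cons.1 hx)
    have hy' := (List.pairwise_cons.1 hy)
    rw [ih hx hy'.2]
    have hgt0 : cntGt (x :: xs) y = 0 := by
      simp only [cntGt]
      norm_num
      exact ⟨not_lt.1 hgt, fun a ha => (hx'.1 a ha).trans (not_lt.1 hgt)⟩
    have hmap : (x :: xs).map (fun x' => x' * (h + cntGe (y :: ys) x'))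
        = (x :: xs).map (fun x' => x' * (h + 1 + cntGe ys x')) := by
      apply List.map_congr_left
      intro x' hx''
      have hle : x' ≤ x := by
        rcases List.mem_cons.1 hx'' with rfl | hm
        · omega
        · exact hx'.1 x' hm
      have : cntGe (y :: ys) x' = 1 + cntGe ys x' := by
        simp only [cntGe, List.countP_cons]
        have : decide (x' ≤ y) = true := by simp; omega
        simp [this]; ring
      rw [this]; ring_nf
    rw [hmap]
    simp only [List.map_cons, List.sum_cons, hgt0]
    ring

-- monotone access on an ascending list
lemma getD_mono (a : List Int) (hs : a.Pairwise (· ≤ ·)) (i j : Nat)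
    (hij : i ≤ j) (hj : j < a.length) : a.getD i 0 ≤ a.getD j 0 := by
  rcases eq_or_lt_of_le hij with rfl | hlt
  · exact le_refl _
  · rw [List.getD_eq_getElem a 0 (lt_of_le_of_lt hij hj), List.getD_eq_getElem a 0 hj]
    exact List.pairwise_iff_getElem.1 hs i j _ _ hlt

-- lbGo finds the cut point between elements < t and elements ≥ t
lemma lbGo_spec (a : List Int) (t : Int) (hs : a.Pairwise (· ≤ ·)) (lo hi : Nat)
    (hlh : lo ≤ hi) (hhi : hi ≤ a.length)
    (hlow : ∀ i, i < lo → i < a.length → a.getD i 0 < t)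
    (hhigh : ∀ i, hi ≤ i → i < a.length → ¬ a.getD i 0 < t) :
    lbGo a t lo hi ≤ a.length
      ∧ (∀ i, i < lbGo a t lo hi → i < a.length → a.getD i 0 < t)
      ∧ (∀ i, lbGo a t lo hi ≤ i → i < a.length → ¬ a.getD i 0 < t) := by
  fun_induction lbGo a t lo hi with
  | case1 lo hi hlt hmid ih =>
    refine ih (by omega) hhi ?_ hhigh
    intro i hi' hil
    have hmle : a.getD i 0 ≤ a.getD ((lo + hi) / 2) 0 :=
      getD_mono a hs i _ (by omega) (by omega)
    omega
  | case2 lo hi hlt hmid ih =>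
    refine ih (by omega) (by omega) hlow ?_
    intro i hi' hil
    have hmle : a.getD ((lo + hi) / 2) 0 ≤ a.getD i 0 :=
      getD_mono a hs _ i (by omega) hil
    omega
  | case3 lo hi hlt =>
    have : lo = hi := by omega
    subst this
    exact ⟨by omega, fun i h1 h2 => hlow i h1 h2, fun i h1 h2 => hhigh i h1 h2⟩

-- same for ubGo with predicate ≤ t
lemma ubGo_spec (a : List Int) (t : Int) (hs : a.Pairwise (· ≤ ·)) (lo hi : Nat)
    (hlh : lo ≤ hi) (hhi : hi ≤ a.length)
    (hlow : ∀ i, i < lo → i < a.length → a.getD i 0 ≤ t)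
    (hhigh : ∀ i, hi ≤ i → i < a.length → ¬ a.getD i 0 ≤ t) :
    ubGo a t lo hi ≤ a.length
      ∧ (∀ i, i < ubGo a t lo hi → i < a.length → a.getD i 0 ≤ t)
      ∧ (∀ i, ubGo a t lo hi ≤ i → i < a.length → ¬ a.getD i 0 ≤ t) := by
  fun_induction ubGo a t lo hi with
  | case1 lo hi hlt hmid ih =>
    refine ih (by omega) hhi ?_ hhigh
    intro i hi' hil
    have hmle : a.getD i 0 ≤ a.getD ((lo + hi) / 2) 0 :=
      getD_mono a hs i _ (by omega) (by omega)
    omega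
  | case2 lo hi hlt hmid ih =>
    refine ih (by omega) (by omega) hlow ?_
    intro i hi' hil
    have hmle : a.getD ((lo + hi) / 2) 0 ≤ a.getD i 0 :=
      getD_mono a hs _ i (by omega) hil
    omega
  | case3 lo hi hlt =>
    have : lo = hi := by omega
    subst this
    exact ⟨by omega, fun i h1 h2 => hlow i h1 h2, fun i h1 h2 => hhigh i h1 h2⟩

-- a cut point IS the countP of the prefix predicate
lemma countP_of_cut (p : Int → Bool) (a : List Int) (r : Nat) (hr : r ≤ a.length)
    (h1 : ∀ i, i < r → i < a.length → p (a.getD i 0))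
    (h2 : ∀ i, r ≤ i → i < a.length → ¬ p (a.getD i 0)) :
    a.countP p = r := by
  induction a generalizing r with
  | nil => simp at hr ⊢; omega
  | cons x a ih =>
    cases r with
    | zero =>
      have hx : ¬ p x := by simpa using h2 0 (by omega) (by simp)
      rw [List.countP_cons, ih 0 (by omega)
        (by omega) (fun i _ hil => by simpa using h2 (i + 1) (by omega) (by simp; omega))]
      simp [hx]
    | succ r =>
      have hx : p x := by simpa using h1 0 (by omega) (by simp)
      rw [List.countP_cons, ih r (by simp at hr; omega)
        (fun i hir hil => by simpa using h1 (i + 1) (by omega) (by simp; omega))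
        (fun i hir hil => by simpa using h2 (i + 1) (by omega) (by simp; omega))]
      simp [hx]

lemma lowerB_count (a : List Int) (t : Int) (hs : a.Pairwise (· ≤ ·)) :
    lowerB a t = a.countP (fun u => decide (u < t)) := by
  obtain ⟨hle, h1, h2⟩ := lbGo_spec a t hs 0 a.length (by omega) (le_refl _)
    (by omega) (by intro i h1 h2; omega)
  exact (countP_of_cut _ a _ hle (fun i hir hil => by simpa using h1 i hir hil)
    (fun i hir hil => by simpa using h2 i hir hil)).symm

lemma upperB_count (a : List Int) (t : Int) (hs : a.Pairwise (· ≤ ·)) :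
    upperB a t = a.countP (fun u => decide (u ≤ t)) := by
  obtain ⟨hle, h1, h2⟩ := ubGo_spec a t hs 0 a.length (by omega) (le_refl _)
    (by omega) (by intro i h1 h2; omega)
  exact (countP_of_cut _ a _ hle (fun i hir hil => by simpa using h1 i hir hil)
    (fun i hir hil => by simpa using h2 i hir hil)).symm

-- length minus the binary-search rank is the count of the complementary predicate
lemma len_sub_lowerB (cy : List Int) (t : Int) (hy : cy.Pairwise (fun a b => b ≤ a)) :
    ((cy.reverse.length : Int) - (lowerB cy.reverse t : Int)) = cntGe cy t := by
  have hs : cy.reverse.Pairwise (· ≤ ·) := by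
    rw [List.pairwise_reverse]; exact hy
  rw [lowerB_count _ _ hs, cntGe, ← List.countP_reverse (l := cy)]
  have hsplit : cy.reverse.length
      = cy.reverse.countP (fun u => decide (u < t)) + cy.reverse.countP (fun u => decide (t ≤ u)) := by
    rw [List.length_eq_countP_add_countP (fun u => decide (u < t))]
    congr 1
    apply List.countP_congr
    intro u _
    simp [not_lt]
  omega

lemma len_sub_upperB (cx : List Int) (t : Int) (hx : cx.Pairwise (fun a b => b ≤ a)) :
    ((cx.reverse.length : Int) - (upperB cx.reverse t : Int)) = cntGt cx t := by
  have hs : cx.reverse.Pairwise (· ≤ ·) := by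
    rw [List.pairwise_reverse]; exact hx
  rw [upperB_count _ _ hs, cntGt, ← List.countP_reverse (l := cx)]
  have hsplit : cx.reverse.length
      = cx.reverse.countP (fun u => decide (u ≤ t)) + cx.reverse.countP (fun u => decide (t < u)) := by
    rw [List.length_eq_countP_add_countP (fun u => decide (u ≤ t))]
    congr 1
    apply List.countP_congr
    intro u _
    simp [not_le]
  omega

lemma foldl_add_eq (l : List Int) (f : Int → Int) (init : Int) :
    l.foldl (fun acc x => acc + f x) init = init + (l.map f).sum := by
  induction l generalizing init with
  | nil => simp
  | cons x l ih => simp [ih]; ring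

-- ===== VERDICT (by name: the statement is the Claim_ definition above) =====
theorem boardCutting_spec : Claim_equal_boardCutting := by
  unfold Claim_equal_boardCutting
  intro cost_y cost_x _
  show boardCutting cost_y cost_x = boardCutting_alt cost_y cost_x
  have hdx : (PySem.List.sorted cost_x (fun t => t) true).Pairwise (fun a b => b ≤ a) :=
    PySem.List.sorted_pairwise_rev cost_x (fun t => t)
  have hdy : (PySem.List.sorted cost_y (fun t => t) true).Pairwise (fun a b => b ≤ a) :=
    PySem.List.sorted_pairwise_rev cost_y (fun t => t)
  set cx := PySem.List.sorted cost_x (fun t => t) true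
  set cy := PySem.List.sorted cost_y (fun t => t) true
  have hA : chainA cx cy 0 1 1 = PySem.Int.mod (raw cx cy 1 1) pvMOD := by
    rw [chainA_eq cx cy 1 1 0 (by decide)]; ring_nf
  have hAdef : boardCutting cost_y cost_x = chainA cx cy 0 1 1 := rfl
  have hBdef : boardCutting_alt cost_y cost_x
      = PySem.Int.mod
          ((cx.map (fun x => x * (1 + ((cy.reverse.length : Int) - (lowerB cy.reverse x : Int))))).sum
            + (cy.map (fun y => y * (1 + ((cx.reverse.length : Int) - (upperB cx.reverse y : Int))))).sum)
          pvMOD := by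
    simp only [boardCutting_alt, foldl_add_eq, zero_add]
    rfl
  rw [hAdef, hBdef]
  have hfx : cx.map (fun x => x * (1 + ((cy.reverse.length : Int) - (lowerB cy.reverse x : Int))))
      = cx.map (fun x => x * (1 + cntGe cy x)) := by
    apply List.map_congr_left
    intro x _
    rw [len_sub_lowerB cy x hdy]
  have hfy : cy.map (fun y => y * (1 + ((cx.reverse.length : Int) - (upperB cx.reverse y : Int))))
      = cy.map (fun y => y * (1 + cntGt cx y)) := by
    apply List.map_congr_left
    intro y _
    rw [len_sub_upperB cx y hdx]
  rw [hfx, hfy]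
  calc chainA cx cy 0 1 1
      = PySem.Int.mod (raw cx cy 1 1) pvMOD := hA
    _ = _ := by
        rw [raw_count cx cy 1 1 hdx hdy]
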